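-- pv_equiv track=rewrite | github.com/falloutdey/Atividades-UFPA | Atividade 1/Questão 8/Questão 8.py | alunos
-- ===== SOURCE A (Python) =====
-- def alunos(conceito):
--   E= 0
--   B= 0
--   R= 0
--   I= 0
--   for perc in conceito:
--     if perc == 'E':
--       E = E + 1
--     if perc == 'B':
--       B = B + 1
--     if perc == 'R':
--       R = R + 1
--     if perc == 'I':
--       I = I + 1
--   return E, B, R, I
-- ===== SOURCE B (Python) =====
-- def alunos(conceito):
--   e, b, r, i = (conceito.count(k) for k in ('E', 'B', 'R', 'I'))
--   return e, b, r, i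
-- ===== Notes on version B (the rewrite author's own statement) =====
-- stated objective: simpler
-- what changed: Replaced the single loop maintaining four scalar counters via four if-branches with four independent staged passes, one list.count per grade letter; order of scans does not matter because each count is independent of the others.
import Mathlib
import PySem

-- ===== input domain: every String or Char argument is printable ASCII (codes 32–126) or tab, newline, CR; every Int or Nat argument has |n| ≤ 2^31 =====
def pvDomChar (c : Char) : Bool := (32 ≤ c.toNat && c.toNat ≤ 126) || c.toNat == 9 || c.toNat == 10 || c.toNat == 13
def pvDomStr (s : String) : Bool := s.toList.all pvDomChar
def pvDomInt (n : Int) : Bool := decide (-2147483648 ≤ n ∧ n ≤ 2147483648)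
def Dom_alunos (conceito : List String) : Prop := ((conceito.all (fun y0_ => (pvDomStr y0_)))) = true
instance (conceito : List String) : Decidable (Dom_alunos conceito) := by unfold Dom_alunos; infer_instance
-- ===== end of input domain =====

-- ===== PORT A =====
-- A: four counters maintained through one loop with four if-branches
def alunos (conceito : List String) : Int × Int × Int × Int :=
  conceito.foldl (fun st perc =>
    let (e, b, r, i) := st
    let e := if perc == "E" then e + 1 else e
    let b := if perc == "B" then b + 1 else b
    let r := if perc == "R" then r + 1 else r
    let i := if perc == "I" then i + 1 else i
    (e, b, r, i)) (0, 0, 0, 0)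

-- ===== PORT B =====
-- B: four independent staged passes, one list.count per grade letter (simpler decomposition)
def alunos_alt (conceito : List String) : Int × Int × Int × Int :=
  match ["E", "B", "R", "I"].map (fun k => PySem.List.count conceito k) with
  | [e, b, r, i] => (e, b, r, i)
  | _ => (0, 0, 0, 0)  -- unreachable: the mapped list has exactly four elements

-- ===== PRECONDITION & SPEC =====
def Spec_alunos (conceito : List String) (out : Int × Int × Int × Int) : Prop := out = alunos_alt conceito
instance (conceito : List String) (out : Int × Int × Int × Int) : Decidable (Spec_alunos conceito out) := by unfold Spec_alunos; infer_instance

-- ===== CLAIM (what is proved, stated in full; the proofs are below) =====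
def Claim_equal_alunos : Prop := ∀ (conceito : List String), Dom_alunos conceito → Spec_alunos conceito (alunos conceito)

-- ===== LEMMAS AND PROOFS =====
theorem alunos_foldl (conceito : List String) (e b r i : Int) :
    conceito.foldl (fun st perc =>
      let (e, b, r, i) := st
      let e := if perc == "E" then e + 1 else e
      let b := if perc == "B" then b + 1 else b
      let r := if perc == "R" then r + 1 else r
      let i := if perc == "I" then i + 1 else i
      (e, b, r, i)) (e, b, r, i)
    = (e + conceito.count "E", b + conceito.count "B",
       r + conceito.count "R", i + conceito.count "I") := by
  induction conceito generalizing e b r i with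
  | nil => simp
  | cons hd tl ih =>
    simp only [List.foldl_cons, List.count_cons, ih]
    by_cases hE : hd = "E" <;> by_cases hB : hd = "B" <;>
      by_cases hR : hd = "R" <;> by_cases hI : hd = "I" <;>
      simp_all <;> omega

-- ===== VERDICT (by name: the statement is the Claim_ definition above) =====
theorem alunos_spec : Claim_equal_alunos := by
  intro conceito _
  unfold Spec_alunos alunos alunos_alt
  rw [alunos_foldl]
  simp [PySem.List.count, List.map]
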